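-- pv_equiv track=rewrite | github.com/LUI-TECH/DeepImageCtr-Model | Model_Input_Procession.py | interest_input
-- ===== SOURCE A (Python) =====
-- def interest_input(interest):
--     #divide interest input into 10 separate inputs
--     interest1=[]
--     interest2=[]
--     interest3=[]
--     interest4=[]
--     interest5=[]
--     interest6=[]
--     interest7=[]
--     interest8=[]
--     interest9=[]
--     interest10=[]
--     for i in interest:
--         j=i.strip().split('|',-1)
--         if len(j)==10:
--           interest1.append(j[0])
--           interest2.append(j[1])
--           interest3.append(j[2])
--           interest4.append(j[3])
--           interest5.append(j[4])
--           interest6.append(j[5])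
--           interest7.append(j[6])
--           interest8.append(j[7])
--           interest9.append(j[8])
--           interest10.append(j[9])
--         else:
--             try:
--                 interest1.append(j[0])
--             except:
--                 interest1.append('0')
--             try:
--                 interest2.append(j[1])
--             except:
--                 interest2.append('0')
--             try:
--                 interest3.append(j[2])
--             except:
--                 interest3.append('0')
--             try:
--                 interest4.append(j[3])
--             except:
--                 interest4.append('0')
--             try:
--                 interest5.append(j[4])
--             except:
--                 interest5.append('0')
--             try:
--                 interest6.append(j[5])
--             except:
--                 interest6.append('0')
--             try:
--                 interest7.append(j[6])
--             except:
--                 interest7.append('0')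
--             try:
--                 interest8.append(j[7])
--             except:
--                 interest8.append('0')
--             try:
--                 interest9.append(j[8])
--             except:
--                 interest9.append('0')
--             try:
--                 interest10.append(j[9])
--             except:
--                 interest10.append('0')
--     return interest1,interest2,interest3,interest4,interest5,interest6,interest7,interest8,interest9,interest10
-- ===== SOURCE B (Python) =====
-- def interest_input(interest):
--     # build one padded 10-field row per string, then transpose into 10 columns
--     rows = [(s.strip().split('|', -1) + ['0'] * 10)[:10] for s in interest]
--     cols = [[r[k] for r in rows] for k in range(10)]
--     return tuple(cols)
-- ===== Notes on version B (the rewrite author's own statement) =====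
-- stated objective: simpler
-- what changed: Replaced A's single pass populating ten named accumulators with per-index try/except blocks by a two-pass build: one padded 10-field row per string, then a transpose into the 10 columns.
import Mathlib
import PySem

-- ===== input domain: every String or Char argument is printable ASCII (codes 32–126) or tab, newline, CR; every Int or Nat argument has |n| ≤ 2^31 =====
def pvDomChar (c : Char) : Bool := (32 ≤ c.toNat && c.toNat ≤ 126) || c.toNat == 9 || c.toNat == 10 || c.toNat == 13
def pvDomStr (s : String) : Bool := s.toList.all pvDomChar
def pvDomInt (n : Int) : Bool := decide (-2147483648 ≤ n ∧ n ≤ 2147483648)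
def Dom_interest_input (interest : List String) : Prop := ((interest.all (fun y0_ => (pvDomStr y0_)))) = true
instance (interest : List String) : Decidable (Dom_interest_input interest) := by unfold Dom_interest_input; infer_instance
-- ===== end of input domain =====

-- B replaces A's ten named accumulators (with per-index try/except) by building one
-- padded 10-field row per string and transposing; objective: simpler.

-- ===== PORT A =====
-- A's loop: one pass over `interest`, appending to ten accumulators.
-- j[k] inside `try … except: append('0')` is ported as (pyGet? j k).getD "0"
-- (pyGet? is none exactly on IndexError); in the len==10 branch the index is
-- always in range, so the same expression is a faithful port of the bare j[k].
def pvStepA (st : List String × List String × List String × List String × List String × List String × List String × List String × List String × List String)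
    (i : String) : List String × List String × List String × List String × List String × List String × List String × List String × List String × List String :=
  let j := (PySem.Str.split? (PySem.Str.strip i) "|").getD []
  match st with
  | (a1, a2, a3, a4, a5, a6, a7, a8, a9, a10) =>
    if j.length == 10 then
      (a1 ++ [(PySem.List.pyGet? j (0 : Int)).getD "0"],
       a2 ++ [(PySem.List.pyGet? j (1 : Int)).getD "0"],
       a3 ++ [(PySem.List.pyGet? j (2 : Int)).getD "0"],
       a4 ++ [(PySem.List.pyGet? j (3 : Int)).getD "0"],
       a5 ++ [(PySem.List.pyGet? j (4 : Int)).getD "0"],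
       a6 ++ [(PySem.List.pyGet? j (5 : Int)).getD "0"],
       a7 ++ [(PySem.List.pyGet? j (6 : Int)).getD "0"],
       a8 ++ [(PySem.List.pyGet? j (7 : Int)).getD "0"],
       a9 ++ [(PySem.List.pyGet? j (8 : Int)).getD "0"],
       a10 ++ [(PySem.List.pyGet? j (9 : Int)).getD "0"])
    else
      (a1 ++ [(PySem.List.pyGet? j (0 : Int)).getD "0"],
       a2 ++ [(PySem.List.pyGet? j (1 : Int)).getD "0"],
       a3 ++ [(PySem.List.pyGet? j (2 : Int)).getD "0"],
       a4 ++ [(PySem.List.pyGet? j (3 : Int)).getD "0"],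
       a5 ++ [(PySem.List.pyGet? j (4 : Int)).getD "0"],
       a6 ++ [(PySem.List.pyGet? j (5 : Int)).getD "0"],
       a7 ++ [(PySem.List.pyGet? j (6 : Int)).getD "0"],
       a8 ++ [(PySem.List.pyGet? j (7 : Int)).getD "0"],
       a9 ++ [(PySem.List.pyGet? j (8 : Int)).getD "0"],
       a10 ++ [(PySem.List.pyGet? j (9 : Int)).getD "0"])

def interest_input (interest : List String) : List String × List String × List String × List String × List String × List String × List String × List String × List String × List String :=
  interest.foldl pvStepA ([], [], [], [], [], [], [], [], [], [])

-- ===== PORT B =====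
-- (s.strip().split('|', -1) + ['0']*10)[:10]
def pvRow (s : String) : List String :=
  PySem.List.slice ((PySem.Str.split? (PySem.Str.strip s) "|").getD [] ++ List.replicate 10 "0") none (some (10 : Int))

-- [r[k] for r in rows]; every row has length 10 and 0 ≤ k < 10, so the default is never hit
def pvCol (rows : List (List String)) (k : Nat) : List String :=
  rows.map (fun r => r.getD k "0")

def interest_input_alt (interest : List String) : List String × List String × List String × List String × List String × List String × List String × List String × List String × List String :=
  let rows := interest.map pvRow
  (pvCol rows 0, pvCol rows 1, pvCol rows 2, pvCol rows 3, pvCol rows 4,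
   pvCol rows 5, pvCol rows 6, pvCol rows 7, pvCol rows 8, pvCol rows 9)

-- ===== PRECONDITION & SPEC =====
def Spec_interest_input (interest : List String) (out : List String × List String × List String × List String × List String × List String × List String × List String × List String × List String) : Prop := out = interest_input_alt interest
instance (interest : List String) (out : List String × List String × List String × List String × List String × List String × List String × List String × List String × List String) : Decidable (Spec_interest_input interest out) := by
  unfold Spec_interest_input
  -- instance search gives up on a 10-deep nested product; give the Prod instance explicitly
  exact @instDecidableEqProd _ _ inferInstance (@instDecidableEqProd _ _ inferInstance
    (@instDecidableEqProd _ _ inferInstance (@instDecidableEqProd _ _ inferInstance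
      (@instDecidableEqProd _ _ inferInstance (@instDecidableEqProd _ _ inferInstance
        (@instDecidableEqProd _ _ inferInstance (@instDecidableEqProd _ _ inferInstance
          (@instDecidableEqProd _ _ inferInstance inferInstance)))))))) out _

-- ===== CLAIM (what is proved, stated in full; the proofs are below) =====
def Claim_equal_interest_input : Prop := ∀ (interest : List String), Dom_interest_input interest → Spec_interest_input interest (interest_input interest)

-- ===== LEMMAS AND PROOFS =====

-- the k-th entry of a padded row is j[k] if in range, else '0'
theorem pvRow_getD (s : String) (k : Nat) (hk : k < 10) :
    (pvRow s).getD k "0" = (PySem.List.pyGet? ((PySem.Str.split? (PySem.Str.strip s) "|").getD []) (k : Int)).getD "0" := by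
  unfold pvRow
  set j := (PySem.Str.split? (PySem.Str.strip s) "|").getD [] with hj
  rw [show ((10 : Int)) = ((10 : Nat) : Int) from rfl, PySem.List.slice_to_natCast]
  simp only [PySem.List.pyGet?_natCast, List.getD]
  rw [List.getElem?_take_of_lt hk, List.getElem?_append]
  by_cases h : k < j.length
  · simp [h]
  · simp only [if_neg h, List.getElem?_replicate]
    have : k - j.length < 10 := by omega
    simp [this, List.getElem?_eq_none (le_of_not_gt h)]

theorem pvCol_cons (r : List String) (rows : List (List String)) (k : Nat) :
    pvCol (r :: rows) k = r.getD k "0" :: pvCol rows k := rfl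

theorem foldA_eq (l : List String)
    (a1 a2 a3 a4 a5 a6 a7 a8 a9 a10 : List String) :
    l.foldl pvStepA (a1, a2, a3, a4, a5, a6, a7, a8, a9, a10) =
      (a1 ++ pvCol (l.map pvRow) 0, a2 ++ pvCol (l.map pvRow) 1,
       a3 ++ pvCol (l.map pvRow) 2, a4 ++ pvCol (l.map pvRow) 3,
       a5 ++ pvCol (l.map pvRow) 4, a6 ++ pvCol (l.map pvRow) 5,
       a7 ++ pvCol (l.map pvRow) 6, a8 ++ pvCol (l.map pvRow) 7,
       a9 ++ pvCol (l.map pvRow) 8, a10 ++ pvCol (l.map pvRow) 9) := by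
  induction l generalizing a1 a2 a3 a4 a5 a6 a7 a8 a9 a10 with
  | nil => simp [pvCol]
  | cons s t ih =>
    have hstep : pvStepA (a1, a2, a3, a4, a5, a6, a7, a8, a9, a10) s =
        (a1 ++ [(pvRow s).getD 0 "0"], a2 ++ [(pvRow s).getD 1 "0"],
         a3 ++ [(pvRow s).getD 2 "0"], a4 ++ [(pvRow s).getD 3 "0"],
         a5 ++ [(pvRow s).getD 4 "0"], a6 ++ [(pvRow s).getD 5 "0"],
         a7 ++ [(pvRow s).getD 6 "0"], a8 ++ [(pvRow s).getD 7 "0"],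
         a9 ++ [(pvRow s).getD 8 "0"], a10 ++ [(pvRow s).getD 9 "0"]) := by
      unfold pvStepA
      simp only [pvRow_getD s 0 (by omega), pvRow_getD s 1 (by omega),
        pvRow_getD s 2 (by omega), pvRow_getD s 3 (by omega),
        pvRow_getD s 4 (by omega), pvRow_getD s 5 (by omega),
        pvRow_getD s 6 (by omega), pvRow_getD s 7 (by omega),
        pvRow_getD s 8 (by omega), pvRow_getD s 9 (by omega)]
      split <;> rfl
    simp only [List.foldl_cons, hstep, ih, List.map_cons, pvCol_cons]
    simp [List.append_assoc]

-- ===== VERDICT (by name: the statement is the Claim_ definition above) =====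
theorem interest_input_spec : Claim_equal_interest_input := by
  intro interest _
  unfold Spec_interest_input interest_input interest_input_alt
  simpa using foldA_eq interest [] [] [] [] [] [] [] [] [] []
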